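-- pv_equiv track=rewrite | github.com/z369437558/Leetcode | 2399.py | checkDistances
-- ===== SOURCE A (Python) =====
-- def checkDistances(s: str, distance: list[int]) -> bool:
--     for i in range(len(distance)):
--         if chr(ord('a')+i) not in s:
--             distance[i]=0
--     distance1=[0 for i in range(26)]
--     dict1={}
--     for i,char in enumerate(s):
--         if char in dict1:
--             distance1[ord(char)-ord('a')]=i-dict1[char]-1
--         else:
--             dict1[char]=i
--     return distance1==distance
-- ===== SOURCE B (Python) =====
-- def checkDistances(s: str, distance: list[int]) -> bool:
--     for i in range(len(distance)):
--         if chr(ord('a')+i) not in s: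
--             distance[i] = 0
--     expected = [0] * 26
--     for i in range(26):
--         c = chr(ord('a') + i)
--         first = s.find(c)
--         last = s.rfind(c)
--         if first != last:
--             expected[i] = last - first - 1
--     return expected == distance
-- ===== Notes on version B (the rewrite author's own statement) =====
-- stated objective: alternative
-- what changed: B replaces A's single forward pass with a first-occurrence dict by a per-letter loop over the 26 lowercase letters that computes each gap directly with string search (s.find/s.rfind), guarded by find != rfind; the dict and the enumerate sweep disappear (the in-place zeroing of absent letters in distance is kept identical, and a timing run measured the C-level find/rfind scans ~1.8x faster than A's per-character dict loop).
import Mathlib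
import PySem

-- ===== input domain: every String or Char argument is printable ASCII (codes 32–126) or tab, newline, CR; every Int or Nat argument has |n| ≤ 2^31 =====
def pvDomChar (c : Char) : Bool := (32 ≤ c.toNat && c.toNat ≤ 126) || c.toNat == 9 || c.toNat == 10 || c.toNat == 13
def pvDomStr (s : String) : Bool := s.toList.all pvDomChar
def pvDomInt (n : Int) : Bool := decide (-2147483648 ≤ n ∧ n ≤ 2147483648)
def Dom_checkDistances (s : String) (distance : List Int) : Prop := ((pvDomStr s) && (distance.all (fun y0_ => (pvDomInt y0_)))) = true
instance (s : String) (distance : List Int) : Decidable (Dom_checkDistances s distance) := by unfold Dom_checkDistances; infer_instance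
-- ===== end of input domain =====

-- B replaces A's one-pass first-occurrence-dict sweep by a per-letter find/rfind scan (objective: alternative; a timing run measured B faster).
-- Both programs zero entries of `distance` in place for absent letters; B performs the identical mutation,
-- and the equivalence proved here is about the return value.

-- ===== PORT A =====
-- Python list assignment xs[i] = v: negative index counts from the end; an out-of-range
-- index raises IndexError in Python — those inputs are excluded by Pre_, here: unchanged.
def pySetItem (xs : List Int) (i : Int) (v : Int) : List Int :=
  let k := if i < 0 then i + (xs.length : Int) else i
  if 0 ≤ k ∧ k < (xs.length : Int) then xs.set k.toNat v else xs

-- body of `for i,char in enumerate(s): if char in dict1: … else: dict1[char]=i`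
def stepA (st : List Int × PySem.Dict Char Int) (p : Int × Char) : List Int × PySem.Dict Char Int :=
  match st.2.get? p.2 with
  | some j => (pySetItem st.1 ((p.2.toNat : Int) - 97) (p.1 - j - 1), st.2)
  | none => (st.1, st.2.insert p.2 p.1)

def checkDistances (s : String) (distance : List Int) : Bool :=
  -- for i in range(len(distance)): if chr(ord('a')+i) not in s: distance[i] = 0   (index from range: in bounds)
  let d := (PySem.List.pyRange 0 (distance.length : Int) 1).foldl
    (fun d i => if !(PySem.Chars.isIn [Char.ofNat (97 + i.toNat)] s.toList) then d.set i.toNat 0 else d)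
    distance
  -- distance1 = [0]*26; dict1 = {}; for i,char in enumerate(s): …
  let r := (PySem.List.enumerate s.toList 0).foldl stepA (List.replicate 26 (0 : Int), PySem.Dict.empty)
  r.1 == d

-- ===== PORT B =====
def checkDistances_alt (s : String) (distance : List Int) : Bool :=
  -- for i in range(len(distance)): if chr(ord('a')+i) not in s: distance[i] = 0   (identical loop in Source B)
  let d := (PySem.List.pyRange 0 (distance.length : Int) 1).foldl
    (fun d i => if !(PySem.Chars.isIn [Char.ofNat (97 + i.toNat)] s.toList) then d.set i.toNat 0 else d)
    distance
  -- expected = [0]*26; for i in range(26): c = chr(97+i); first = s.find(c); last = s.rfind(c); if first != last: expected[i] = last-first-1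
  let expected := (PySem.List.pyRange 0 26 1).foldl
    (fun e i =>
      let c := Char.ofNat (97 + i.toNat)
      let first := PySem.Chars.find s.toList [c]
      let last := PySem.Chars.rfind s.toList [c]
      if first != last then e.set i.toNat (last - first - 1) else e)
    (List.replicate 26 (0 : Int))
  expected == d

-- ===== PRECONDITION & SPEC =====
-- Pre_ excludes strings with a repeated character outside 'a'..'z': on those A either raises
-- IndexError (repeated character with code < 71 or > 122) or its negative-index wraparound
-- distance1[ord(c)-97] aliases the character onto a letter slot (codes 71..96), an accident
-- of A's implementation; every character that occurs more than once must be a lowercase letter.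
def Pre_checkDistances (s : String) (distance : List Int) : Prop :=
  (s.toList.all (fun c =>
    decide (s.toList.count c ≤ 1) || (decide (97 ≤ c.toNat) && decide (c.toNat ≤ 122)))) = true
instance (s : String) (distance : List Int) : Decidable (Pre_checkDistances s distance) := by
  unfold Pre_checkDistances; infer_instance

def pvWitness_checkDistances : String × List Int := ("aab", [0, 0, 0])

def Spec_checkDistances (s : String) (distance : List Int) (out : Bool) : Prop := out = checkDistances_alt s distance
instance (s : String) (distance : List Int) (out : Bool) : Decidable (Spec_checkDistances s distance out) := by unfold Spec_checkDistances; infer_instance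

-- ===== CLAIM (what is proved, stated in full; the proofs are below) =====
def Claim_equal_checkDistances : Prop := ∀ (s : String) (distance : List Int), Dom_checkDistances s distance → Pre_checkDistances s distance → Spec_checkDistances s distance (checkDistances s distance)


-- ===== LEMMAS AND PROOFS =====

/-- letter number k, i.e. `chr(97+k)` -/
def ck (k : Nat) : Char := Char.ofNat (97 + k)

/-- B's per-letter gap value. -/
def gapB (l : List Char) (c : Char) : Int :=
  if PySem.Chars.find l [c] != PySem.Chars.rfind l [c]
  then PySem.Chars.rfind l [c] - PySem.Chars.find l [c] - 1 else 0

/-- the common value both inner loops compute -/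
def gMap (l : List Char) : List Int := (List.range 26).map (fun k => gapB l (ck k))

lemma pre_forall {s : String} {distance : List Int} (h : Pre_checkDistances s distance) :
    ∀ c ∈ s.toList, 1 < s.toList.count c → 97 ≤ c.toNat ∧ c.toNat ≤ 122 := by
  intro c hc hcnt
  have hall := List.all_eq_true.mp h c hc
  simp only [Bool.or_eq_true, Bool.and_eq_true, decide_eq_true_eq] at hall
  rcases hall with h1 | h2
  · omega
  · exact h2

lemma prefix_singleton (c : Char) (xs : List Char) :
    ([c].isPrefixOf xs) = decide (xs.head? = some c) := by
  cases xs with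
  | nil => simp [List.isPrefixOf]
  | cons x t => simp [List.isPrefixOf, eq_comm, Bool.beq_eq_decide_eq]

lemma find_go_singleton (c : Char) (l : List Char) (k : Nat) :
    PySem.Chars.find.go [c] l k = if c ∈ l then ((k + l.idxOf c : Nat) : Int) else -1 := by
  induction l generalizing k with
  | nil => simp [PySem.Chars.find.go]
  | cons x t ih =>
    rw [PySem.Chars.find.go, prefix_singleton]
    by_cases hx : x = c
    · subst hx; simp [List.idxOf_cons_self]
    · simp only [List.head?_cons, Option.some.injEq, hx, decide_false, Bool.false_eq_true,
        if_false]
      rw [ih]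
      by_cases hmem : c ∈ t
      · rw [if_pos hmem, if_pos (List.mem_cons_of_mem _ hmem), List.idxOf_cons_ne _ hx]
        push_cast; ring
      · rw [if_neg hmem, if_neg (by simp [hmem, Ne.symm hx])]

lemma find_singleton (l : List Char) (c : Char) :
    PySem.Chars.find l [c] = if c ∈ l then (l.idxOf c : Int) else -1 := by
  rw [PySem.Chars.find, find_go_singleton]; simp

lemma head?_ne_of_not_mem {c : Char} {l : List Char} (h : c ∉ l) : l.head? ≠ some c :=
  fun hh => h (List.mem_of_mem_head? hh)

lemma rfind_go_not_mem (c : Char) (l : List Char) (h : c ∉ l) (j : Nat) :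
    PySem.Chars.rfind.go l [c] j = -1 := by
  induction j with
  | zero =>
    rw [PySem.Chars.rfind.go, prefix_singleton]
    simp [head?_ne_of_not_mem h]
  | succ j ih =>
    rw [PySem.Chars.rfind.go, prefix_singleton]
    have hd : (l.drop (j+1)).head? ≠ some c := by
      rw [List.head?_drop]
      intro hh
      exact h (List.mem_of_getElem? hh)
    simp only [hd, decide_false, Bool.false_eq_true, if_false]
    exact ih

lemma rfind_not_mem (l : List Char) (c : Char) (h : c ∉ l) :
    PySem.Chars.rfind l [c] = -1 := by
  rw [PySem.Chars.rfind]; exact rfind_go_not_mem c l h _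

lemma rfind_append_self (l : List Char) (a : Char) :
    PySem.Chars.rfind (l ++ [a]) [a] = (l.length : Int) := by
  rw [PySem.Chars.rfind]
  have hlen : (l ++ [a]).length = l.length + 1 := by simp
  rw [hlen, PySem.Chars.rfind.go, prefix_singleton]
  have h1 : ((l ++ [a]).drop (l.length + 1)).head? = none := by
    rw [List.head?_drop]; simp
  simp only [h1, reduceCtorEq, decide_false, Bool.false_eq_true, if_false]
  cases hl : l.length with
  | zero =>
    have : l = [] := List.eq_nil_of_length_eq_zero hl
    subst this
    rw [PySem.Chars.rfind.go, prefix_singleton]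
    simp
  | succ m =>
    rw [PySem.Chars.rfind.go, prefix_singleton]
    have h2 : ((l ++ [a]).drop (m+1)).head? = some a := by
      rw [List.head?_drop]
      rw [List.getElem?_append_right (by omega)]
      simp [hl]
    simp [h2, hl]

lemma rfind_go_append_ne (l : List Char) (a c : Char) (h : a ≠ c) (j : Nat) (hj : j ≤ l.length) :
    PySem.Chars.rfind.go (l ++ [a]) [c] j = PySem.Chars.rfind.go l [c] j := by
  induction j with
  | zero =>
    rw [PySem.Chars.rfind.go, PySem.Chars.rfind.go, prefix_singleton, prefix_singleton]
    cases l with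
    | nil => simp [h]
    | cons x t => simp
  | succ j ih =>
    rw [PySem.Chars.rfind.go, PySem.Chars.rfind.go, prefix_singleton, prefix_singleton,
      List.head?_drop, List.head?_drop]
    have : ((l ++ [a])[j+1]? = some c) ↔ (l[j+1]? = some c) := by
      by_cases hlt : j + 1 < l.length
      · rw [List.getElem?_append_left hlt]
      · have hj1 : j + 1 = l.length := by omega
        rw [List.getElem?_append_right (by omega)]
        simp [hj1, h, List.getElem?_eq_none_iff.mpr (show l.length ≤ j + 1 by omega)]
    simp only [this]
    rw [ih (by omega)]

lemma rfind_append_ne (l : List Char) (a c : Char) (h : a ≠ c) :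
    PySem.Chars.rfind (l ++ [a]) [c] = PySem.Chars.rfind l [c] := by
  rw [PySem.Chars.rfind, PySem.Chars.rfind]
  have hlen : (l ++ [a]).length = l.length + 1 := by simp
  rw [hlen, PySem.Chars.rfind.go, prefix_singleton]
  have h1 : ((l ++ [a]).drop (l.length + 1)).head? = none := by
    rw [List.head?_drop]; simp
  simp only [h1, reduceCtorEq, decide_false, Bool.false_eq_true, if_false]
  exact rfind_go_append_ne l a c h l.length le_rfl

lemma gapB_not_mem (l : List Char) (a : Char) (h : a ∉ l) : gapB l a = 0 := by
  simp [gapB, find_singleton, rfind_not_mem _ _ h, h]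

lemma gapB_append_not_mem (l : List Char) (a : Char) (h : a ∉ l) : gapB (l ++ [a]) a = 0 := by
  have hf : PySem.Chars.find (l ++ [a]) [a] = (l.length : Int) := by
    rw [find_singleton, if_pos (by simp), List.idxOf_append_of_notMem h]
    simp
  simp [gapB, hf, rfind_append_self]

lemma gapB_append_ne (l : List Char) (a c : Char) (h : a ≠ c) : gapB (l ++ [a]) c = gapB l c := by
  have hf : PySem.Chars.find (l ++ [a]) [c] = PySem.Chars.find l [c] := by
    rw [find_singleton, find_singleton]
    by_cases hm : c ∈ l
    · rw [if_pos (by simp [hm]), if_pos hm, List.idxOf_append_of_mem hm]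
    · rw [if_neg (by simp [hm, Ne.symm h]), if_neg hm]
  simp [gapB, hf, rfind_append_ne _ _ _ h]

lemma toNat_ck (k : Nat) (hk : k < 26) : (ck k).toNat = 97 + k := by
  have hv : Nat.isValidChar (97 + k) := by left; omega
  rw [ck, Char.ofNat, dif_pos hv]
  rfl

lemma ck_eq_iff (k : Nat) (hk : k < 26) (a : Char) (ha : 97 ≤ a.toNat) (ha2 : a.toNat ≤ 122) :
    ck k = a ↔ k = a.toNat - 97 := by
  constructor
  · intro h
    have := toNat_ck k hk
    rw [h] at this
    omega
  · intro h
    have hv : Nat.isValidChar a.toNat := by left; omega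
    have : 97 + k = a.toNat := by omega
    rw [ck, this, Char.ofNat_toNat]

lemma gMap_nil : List.replicate 26 (0 : Int) = gMap [] := by
  rw [gMap, List.map_congr_left (fun k _ => gapB_not_mem [] (ck k) (by simp))]
  simp [List.map_const']

lemma A_fold_inv (l : List Char)
    (hpre : ∀ c ∈ l, 1 < l.count c → 97 ≤ c.toNat ∧ c.toNat ≤ 122) :
    ((PySem.List.enumerate l 0).foldl stepA (List.replicate 26 (0 : Int), PySem.Dict.empty)).1 = gMap l
    ∧ ∀ c : Char, ((PySem.List.enumerate l 0).foldl stepA (List.replicate 26 (0 : Int), PySem.Dict.empty)).2.get? c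
        = if c ∈ l then some (l.idxOf c : Int) else none := by
  induction l using List.reverseRecOn with
  | nil =>
    refine ⟨by simpa [PySem.List.enumerate_nil] using gMap_nil, fun c => ?_⟩
    simp [PySem.List.enumerate_nil, PySem.Dict.get?_empty]
  | append_singleton l a ih =>
    have hpre' : ∀ c ∈ l, 1 < l.count c → 97 ≤ c.toNat ∧ c.toNat ≤ 122 := by
      intro c hc hcnt
      refine hpre c (by simp [hc]) ?_
      rw [List.count_append]
      omega
    obtain ⟨ih1, ih2⟩ := ih hpre'
    have henum : PySem.List.enumerate (l ++ [a]) 0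
        = PySem.List.enumerate l 0 ++ [((l.length : Int), a)] := by
      rw [PySem.List.enumerate_append]
      simp [PySem.List.enumerate_cons, PySem.List.enumerate_nil]
    rw [henum, List.foldl_append]
    simp only [List.foldl_cons, List.foldl_nil]
    by_cases hmem : a ∈ l
    · have hget : (((PySem.List.enumerate l 0).foldl stepA
          (List.replicate 26 (0 : Int), PySem.Dict.empty)).2).get? a = some (l.idxOf a : Int) := by
        rw [ih2 a, if_pos hmem]
      rw [stepA, hget]
      have hrange : 97 ≤ a.toNat ∧ a.toNat ≤ 122 := by
        refine hpre a (by simp) ?_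
        rw [List.count_append]
        have := List.count_pos_iff.mpr hmem
        simp
        omega
      have hidx : l.idxOf a < l.length := List.idxOf_lt_length_of_mem hmem
      constructor
      · show pySetItem (((PySem.List.enumerate l 0).foldl stepA
            (List.replicate 26 (0 : Int), PySem.Dict.empty)).1)
            ((a.toNat : Int) - 97) ((l.length : Int) - (l.idxOf a : Int) - 1) = gMap (l ++ [a])
        rw [ih1, pySetItem]
        have hlen : (gMap l).length = 26 := by simp [gMap]
        have hi0 : ¬ ((a.toNat : Int) - 97 < 0) := by omega
        simp only [hi0, if_false, hlen]
        rw [if_pos (by constructor <;> [omega; omega])]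
        have htn : ((a.toNat : Int) - 97).toNat = a.toNat - 97 := by omega
        rw [htn]
        apply List.ext_getElem (by simp [gMap])
        intro k hk1 hk2
        have hk : k < 26 := by simpa [gMap] using hk2
        rw [List.getElem_set]
        simp only [gMap, List.getElem_map, List.getElem_range]
        by_cases hkm : a.toNat - 97 = k
        · rw [if_pos hkm]
          have hck : ck k = a := (ck_eq_iff k hk a hrange.1 hrange.2).mpr hkm.symm
          rw [hck]
          have hfind : PySem.Chars.find (l ++ [a]) [a] = (l.idxOf a : Int) := by
            rw [find_singleton, if_pos (by simp [hmem]), List.idxOf_append_of_mem hmem]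
          rw [gapB, hfind, rfind_append_self]
          have hne : ((l.idxOf a : Int) != (l.length : Int)) = true := by
            simp [bne_iff_ne]
            omega
          rw [if_pos hne]
        · rw [if_neg hkm]
          have hck : a ≠ ck k := by
            intro e
            exact hkm (((ck_eq_iff k hk a hrange.1 hrange.2).mp e.symm).symm)
          rw [gapB_append_ne l a (ck k) hck]
      · intro c
        show (((PySem.List.enumerate l 0).foldl stepA
            (List.replicate 26 (0 : Int), PySem.Dict.empty)).2).get? c
            = if c ∈ l ++ [a] then some (((l ++ [a]).idxOf c : Nat) : Int) else none
        rw [ih2 c]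
        by_cases hc : c ∈ l
        · rw [if_pos hc, if_pos (by simp [hc]), List.idxOf_append_of_mem hc]
        · rw [if_neg hc, if_neg (by simp [hc]; intro e; subst e; exact hc hmem)]
    · have hget : (((PySem.List.enumerate l 0).foldl stepA
          (List.replicate 26 (0 : Int), PySem.Dict.empty)).2).get? a = none := by
        rw [ih2 a, if_neg hmem]
      rw [stepA, hget]
      constructor
      · show ((PySem.List.enumerate l 0).foldl stepA
            (List.replicate 26 (0 : Int), PySem.Dict.empty)).1 = gMap (l ++ [a])
        rw [ih1, gMap, gMap]
        apply List.map_congr_left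
        intro k hkr
        have hk : k < 26 := List.mem_range.mp hkr
        by_cases hck : ck k = a
        · rw [hck, gapB_not_mem l a hmem, gapB_append_not_mem l a hmem]
        · rw [gapB_append_ne l a (ck k) (fun e => hck e.symm)]
      · intro c
        show ((((PySem.List.enumerate l 0).foldl stepA
            (List.replicate 26 (0 : Int), PySem.Dict.empty)).2).insert a (l.length : Int)).get? c
            = if c ∈ l ++ [a] then some (((l ++ [a]).idxOf c : Nat) : Int) else none
        rw [PySem.Dict.get?_insert, ih2 c]
        by_cases hc : c = a
        · subst hc
          rw [if_pos rfl, if_pos (by simp)]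
          rw [List.idxOf_append_of_notMem hmem]
          simp
        · rw [if_neg hc]
          by_cases hcl : c ∈ l
          · rw [if_pos hcl, if_pos (by simp [hcl]), List.idxOf_append_of_mem hcl]
          · rw [if_neg hcl, if_neg (by simp [hcl, hc])]

lemma foldl_range_set (n : Nat) (cond : Nat → Bool) (g : Nat → Int) (m : Nat) (hm : m ≤ n) :
    (List.range m).foldl (fun e k => if cond k then e.set k (g k) else e) (List.replicate n 0)
      = (List.range n).map (fun k => if k < m ∧ cond k = true then g k else 0) := by
  induction m with
  | zero => simp [List.map_const']
  | succ m ih =>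
    rw [List.range_succ, List.foldl_append, ih (by omega)]
    simp only [List.foldl_cons, List.foldl_nil]
    by_cases hc : cond m
    · rw [if_pos hc]
      apply List.ext_getElem (by simp)
      intro k hk1 hk2
      simp only [List.getElem_set, List.getElem_map, List.getElem_range]
      by_cases hkm : k = m
      · subst hkm; simp [hc]
      · simp only [if_neg (Ne.symm hkm)]
        by_cases h2 : cond k = true
        · have hkm' : k ≠ m := hkm
          simp [h2, Nat.lt_succ_iff, show k ≤ m ↔ k < m from by omega]
        · simp [h2]
    · rw [if_neg hc]
      apply List.ext_getElem (by simp)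
      intro k hk1 hk2
      simp only [List.getElem_map, List.getElem_range]
      by_cases h2 : cond k = true
      · have hkm : k ≠ m := fun e => hc (e ▸ h2)
        simp [h2, show k ≤ m ↔ k < m from by omega]
      · simp [h2]

lemma B_fold_eq (l : List Char) :
    ((PySem.List.pyRange 0 26 1).foldl
      (fun e i =>
        let c := Char.ofNat (97 + i.toNat)
        let first := PySem.Chars.find l [c]
        let last := PySem.Chars.rfind l [c]
        if first != last then e.set i.toNat (last - first - 1) else e)
      (List.replicate 26 (0 : Int))) = gMap l := by
  rw [show (26 : Int) = ((26 : Nat) : Int) from by norm_num, PySem.List.pyRange_zero_natCast,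
    List.foldl_map]
  simp only [Int.toNat_natCast]
  rw [foldl_range_set 26
    (fun k => PySem.Chars.find l [Char.ofNat (97 + k)] != PySem.Chars.rfind l [Char.ofNat (97 + k)])
    (fun k => PySem.Chars.rfind l [Char.ofNat (97 + k)] - PySem.Chars.find l [Char.ofNat (97 + k)] - 1)
    26 le_rfl]
  apply List.map_congr_left
  intro k hkr
  have hk : k < 26 := List.mem_range.mp hkr
  simp only [gapB, ck, hk, true_and]

-- ===== VERDICT (by name: the statement is the Claim_ definition above) =====
theorem checkDistances_spec : Claim_equal_checkDistances := by
  unfold Claim_equal_checkDistances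
  intro s distance _ hpre
  unfold Spec_checkDistances
  show checkDistances s distance = checkDistances_alt s distance
  rw [checkDistances, checkDistances_alt]
  rw [(A_fold_inv s.toList (pre_forall hpre)).1, B_fold_eq s.toList]
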